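-- pv_equiv track=rewrite | github.com/Chenypovo/Personal_RAG | app/chunker/text_chunker.py | _trim_with_span
-- ===== SOURCE A (Python) =====
-- from typing import Callable, Dict, List, Optional, Sequence, Tuple
--
-- def _trim_with_span(raw: str, start: int) -> Tuple[str, int, int]:
--     left = 0
--     right = len(raw)
--     while left < right and raw[left].isspace():
--         left += 1
--     while right > left and raw[right - 1].isspace():
--         right -= 1
--     return raw[left:right], start + left, start + right
-- ===== SOURCE B (Python) =====
-- def _trim_with_span(raw: str, start: int):
--     first = last = None
--     for i, ch in enumerate(raw):
--         if not ch.isspace():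
--             if first is None:
--                 first = i
--             last = i
--     if first is None:
--         n = len(raw)
--         return "", start + n, start + n
--     return raw[first:last + 1], start + first, start + last + 1
-- ===== Notes on version B (the rewrite author's own statement) =====
-- stated objective: alternative
-- what changed: Replaces A's two directed index-scanning while-loops (one from each end) with a single forward pass over enumerate(raw) that accumulates the first and last non-whitespace positions, then slices once; the all-whitespace case falls out of the no-match branch as ("", start+len, start+len).
import Mathlib
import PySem

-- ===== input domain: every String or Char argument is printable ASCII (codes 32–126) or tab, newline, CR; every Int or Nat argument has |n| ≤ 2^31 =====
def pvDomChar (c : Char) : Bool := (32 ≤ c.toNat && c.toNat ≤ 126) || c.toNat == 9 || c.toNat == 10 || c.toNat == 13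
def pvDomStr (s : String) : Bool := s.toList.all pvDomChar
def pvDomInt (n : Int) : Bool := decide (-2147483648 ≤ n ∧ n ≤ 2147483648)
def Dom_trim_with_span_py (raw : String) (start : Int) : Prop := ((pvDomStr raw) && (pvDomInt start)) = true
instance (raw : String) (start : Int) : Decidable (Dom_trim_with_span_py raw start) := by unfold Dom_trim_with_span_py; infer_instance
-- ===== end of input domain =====

-- B replaces A's two directed index-scanning while-loops with a single forward pass
-- (enumerate + accumulator) that records the first and last non-whitespace positions,
-- then slices once (alternative decomposition; same asymptotic cost).

-- ===== PORT A =====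
-- `while left < right and raw[left].isspace(): left += 1`
def pvLeftLoop (raw : String) (left right : Int) : Int :=
  if left < right ∧ ((PySem.Str.pyGet? raw left).map PySem.Chars.isspace).getD false = true then
    pvLeftLoop raw (left + 1) right
  else left
termination_by (right - left).toNat
decreasing_by omega

-- `while right > left and raw[right - 1].isspace(): right -= 1`
def pvRightLoop (raw : String) (left right : Int) : Int :=
  if right > left ∧ ((PySem.Str.pyGet? raw (right - 1)).map PySem.Chars.isspace).getD false = true then
    pvRightLoop raw left (right - 1)
  else right
termination_by (right - left).toNat
decreasing_by omega

def trim_with_span_py (raw : String) (start : Int) : String × Int × Int :=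
  let left := pvLeftLoop raw 0 (PySem.Str.len raw)
  let right := pvRightLoop raw left (PySem.Str.len raw)
  (PySem.Str.slice raw (some left) (some right), start + left, start + right)

-- ===== PORT B =====
-- loop body: `if not ch.isspace(): first = i if first is None else first; last = i`
def pvStep (st : Option Int × Option Int) (p : Int × Char) : Option Int × Option Int :=
  if PySem.Chars.isspace p.2 = false then
    ((match st.1 with | none => some p.1 | some f => some f), some p.1)
  else st

def trim_with_span_py_alt (raw : String) (start : Int) : String × Int × Int :=
  let st := (PySem.List.enumerate raw.toList).foldl pvStep (none, none)
  match st with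
  | (none, _) => ("", start + PySem.Str.len raw, start + PySem.Str.len raw)
  | (some f, lastOpt) =>
    -- in the Python, `last` is always set when `first` is; this getD is unreachable
    let lst := lastOpt.getD f
    (PySem.Str.slice raw (some f) (some (lst + 1)), start + f, start + lst + 1)

-- ===== PRECONDITION & SPEC =====
def Spec_trim_with_span_py (raw : String) (start : Int) (out : String × Int × Int) : Prop := out = trim_with_span_py_alt raw start
instance (raw : String) (start : Int) (out : String × Int × Int) : Decidable (Spec_trim_with_span_py raw start out) := by unfold Spec_trim_with_span_py; infer_instance

-- ===== CLAIM (what is proved, stated in full; the proofs are below) =====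
def Claim_equal_trim_with_span_py : Prop := ∀ (raw : String) (start : Int), Dom_trim_with_span_py raw start → Spec_trim_with_span_py raw start (trim_with_span_py raw start)

-- ===== LEMMAS AND PROOFS =====

-- A's first loop, started at k, stops after the maximal run of whitespace from k on.
lemma pvLeftLoop_eq (raw : String) : ∀ (m k : Nat), raw.toList.length - k = m → k ≤ raw.toList.length →
    pvLeftLoop raw (k : Int) (raw.toList.length : Int)
      = (k : Int) + (((raw.toList.drop k).takeWhile PySem.Chars.isspace).length : Int) := by
  intro m
  induction m with
  | zero =>
    intro k hm hk
    have hk' : k = raw.toList.length := by omega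
    subst hk'
    rw [pvLeftLoop]
    simp
  | succ m ih =>
    intro k hm hk
    have hlt : k < raw.toList.length := by omega
    have hget : raw.toList[k]? = some raw.toList[k] := List.getElem?_eq_getElem hlt
    have hdrop : raw.toList.drop k = raw.toList[k] :: raw.toList.drop (k+1) :=
      List.drop_eq_getElem_cons hlt
    rw [pvLeftLoop, PySem.Str.pyGet?_natCast, hget]
    by_cases hs : PySem.Chars.isspace raw.toList[k] = true
    · rw [if_pos ⟨by exact_mod_cast hlt, by simp [hs]⟩]
      have h1 : ((k:Int) + 1) = ((k+1 : Nat) : Int) := by push_cast; ring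
      rw [h1, ih (k+1) (by omega) (by omega)]
      rw [hdrop, List.takeWhile_cons_of_pos hs]
      simp only [List.length_cons]; push_cast; ring
    · rw [if_neg (by simp [hs])]
      rw [hdrop, List.takeWhile_cons_of_neg (by simpa using hs)]
      simp

-- A's second loop, started at r, stops after the maximal run of trailing whitespace of raw[L:r].
lemma pvRightLoop_eq (raw : String) (L : Nat) : ∀ (m r : Nat), r - L = m → L ≤ r → r ≤ raw.toList.length →
    pvRightLoop raw (L : Int) (r : Int)
      = (L : Int) + ((((raw.toList.drop L).take (r - L)).reverse.dropWhile PySem.Chars.isspace).length : Int) := by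
  intro m
  induction m with
  | zero =>
    intro r hm hL hr
    have h0 : r = L := by omega
    subst h0
    rw [pvRightLoop]
    simp
  | succ m ih =>
    intro r hm hL hr
    have hLr : L < r := by omega
    have hlt : r - 1 < raw.toList.length := by omega
    have hc : (r:Int) - 1 = ((r-1 : Nat) : Int) := by omega
    have hget : raw.toList[r-1]? = some raw.toList[r-1] := List.getElem?_eq_getElem hlt
    have hlen : r - 1 - L < (raw.toList.drop L).length := by
      simp only [List.length_drop]; omega
    have hidx : (raw.toList.drop L)[r-1-L]'hlen = raw.toList[r-1] := by
      rw [List.getElem_drop]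
      congr 1; omega
    have htake : (raw.toList.drop L).take (r - L)
        = (raw.toList.drop L).take (r-1-L) ++ [raw.toList[r-1]] := by
      have h1 : r - L = (r-1-L) + 1 := by omega
      rw [h1, List.take_add_one, List.getElem?_eq_getElem hlen, hidx]
      rfl
    rw [pvRightLoop, hc, PySem.Str.pyGet?_natCast, hget]
    by_cases hs : PySem.Chars.isspace raw.toList[r-1] = true
    · rw [if_pos ⟨by exact_mod_cast hLr, by simp [hs]⟩, ih (r-1) (by omega) (by omega) (by omega)]
      rw [htake, List.reverse_append]
      simp [List.dropWhile_cons_of_pos hs]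
    · rw [if_neg (by simp [hs])]
      rw [htake, List.reverse_append]
      simp only [List.reverse_singleton, List.singleton_append,
        List.dropWhile_cons_of_neg (by simpa using hs), List.length_cons,
        List.length_reverse, List.length_take, List.length_drop]
      push_cast
      omega

-- proof-only abbreviations: leading-whitespace count, trailing-whitespace count, trimmed length
def pvL (raw : String) : Nat := (raw.toList.takeWhile PySem.Chars.isspace).length
def pvT (raw : String) : Nat := (raw.toList.reverse.takeWhile PySem.Chars.isspace).length
def pvRlen (raw : String) : Nat :=
  ((raw.toList.drop (pvL raw)).reverse.dropWhile PySem.Chars.isspace).length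

-- a list with a non-whitespace char: its reverse's whitespace-takeWhile is proper
lemma pv_not_all_len (l : List Char) (h : l.all PySem.Chars.isspace = false) :
    ¬ ((l.reverse.takeWhile PySem.Chars.isspace).length = l.reverse.length) := by
  intro hlen
  have heq : l.reverse.takeWhile PySem.Chars.isspace = l.reverse :=
    (List.takeWhile_prefix _).eq_of_length hlen
  have hmem := List.takeWhile_eq_self_iff.mp heq
  have : l.all PySem.Chars.isspace = true :=
    List.all_eq_true.mpr (fun x hx => hmem x (List.mem_reverse.mpr hx))
  simp [this] at h

-- prepending a char to a list with a non-whitespace char keeps the trailing run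
lemma pv_tw_rev (c : Char) (cs : List Char) (h : cs.all PySem.Chars.isspace = false) :
    (c :: cs).reverse.takeWhile PySem.Chars.isspace = cs.reverse.takeWhile PySem.Chars.isspace := by
  rw [List.reverse_cons, List.takeWhile_append, if_neg (by simpa using pv_not_all_len cs h)]

-- B's single forward scan computes the first and last non-whitespace indices.
lemma pvScan_eq : ∀ (l : List Char) (k : Int) (st : Option Int × Option Int),
    (PySem.List.enumerate l k).foldl pvStep st =
      if l.all PySem.Chars.isspace then st
      else (st.1.or (some (k + ((l.takeWhile PySem.Chars.isspace).length : Int))),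
            some (k + (l.length : Int) - 1 - ((l.reverse.takeWhile PySem.Chars.isspace).length : Int))) := by
  intro l
  induction l with
  | nil => intro k st; simp [PySem.List.enumerate]
  | cons c cs ih =>
    intro k st
    rw [PySem.List.enumerate_cons, List.foldl_cons]
    by_cases hall : cs.all PySem.Chars.isspace = true
    all_goals
      have hcs : cs.all PySem.Chars.isspace = true ∨ cs.all PySem.Chars.isspace = false := by
        cases cs.all PySem.Chars.isspace <;> simp
    · -- tail all whitespace
      by_cases hs : PySem.Chars.isspace c = true
      · have hstep : pvStep st (k, c) = st := by simp [pvStep, hs]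
        have hallc : (c :: cs).all PySem.Chars.isspace = true := by
          simp [List.all_cons, hs, hall]
        rw [hstep, ih, if_pos hall, if_pos hallc]
      · have hsb : PySem.Chars.isspace c = false := by simpa using hs
        have hstep : pvStep st (k, c)
            = ((match st.1 with | none => some k | some f => some f), some k) := by
          simp [pvStep, hsb]
        have hst1 : (match st.1 with | none => some k | some f => some f) = st.1.or (some k) := by
          cases st.1 <;> rfl
        have hallc : (c :: cs).all PySem.Chars.isspace = false := by
          simp [List.all_cons, hsb]
        rw [hstep, ih, if_pos hall]
        simp only [hallc, Bool.false_eq_true, if_false]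
        have hcsrev : cs.reverse.takeWhile PySem.Chars.isspace = cs.reverse := by
          rw [List.takeWhile_eq_self_iff]
          intro x hx
          exact (List.all_eq_true.mp hall) x (by simpa using hx)
        rw [List.reverse_cons, List.takeWhile_append, if_pos (by rw [hcsrev]),
          List.takeWhile_cons_of_neg (by simp [hsb])]
        congr 1
        · rw [hst1]
          simp
        · simp only [List.takeWhile_cons_of_neg (by simp [hsb] : ¬ PySem.Chars.isspace c = true),
            List.append_nil, List.length_reverse, List.length_cons]
          congr 1
          push_cast
          ring
    · -- tail has a non-whitespace char
      have hallF : cs.all PySem.Chars.isspace = false := by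
        rcases hcs with h | h
        · exact absurd h hall
        · exact h
      have hrev := pv_tw_rev c cs hallF
      by_cases hs : PySem.Chars.isspace c = true
      · have hstep : pvStep st (k, c) = st := by simp [pvStep, hs]
        have hallc : (c :: cs).all PySem.Chars.isspace = false := by
          simp [List.all_cons, hallF]
        rw [hstep, ih, if_neg hall]
        simp only [hallc, Bool.false_eq_true, if_false]
        rw [hrev, List.takeWhile_cons_of_pos hs]
        congr 1
        · congr 2
          simp only [List.length_cons]
          push_cast; ring
        · congr 1
          simp only [List.length_cons]
          push_cast; ring
      · have hsb : PySem.Chars.isspace c = false := by simpa using hs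
        have hstep : pvStep st (k, c)
            = ((match st.1 with | none => some k | some f => some f), some k) := by
          simp [pvStep, hsb]
        have hst1 : (match st.1 with | none => some k | some f => some f) = st.1.or (some k) := by
          cases st.1 <;> rfl
        have hallc : (c :: cs).all PySem.Chars.isspace = false := by
          simp [List.all_cons, hsb]
        rw [hstep, ih, if_neg hall]
        simp only [hallc, Bool.false_eq_true, if_false]
        rw [hrev, List.takeWhile_cons_of_neg (by simp [hsb])]
        congr 1
        · rw [hst1, Option.or_assoc, Option.some_or]
          simp
        · congr 1
          simp only [List.length_cons]
          push_cast; ring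

-- the trailing-whitespace run does not reach past the leading run when some char is non-space
lemma pvT_eq (raw : String) (hall : raw.toList.all PySem.Chars.isspace = false) :
    pvT raw = ((raw.toList.drop (pvL raw)).reverse.takeWhile PySem.Chars.isspace).length := by
  have hsplit : raw.toList.reverse
      = (raw.toList.drop (pvL raw)).reverse ++ (raw.toList.take (pvL raw)).reverse := by
    rw [← List.reverse_append, List.take_append_drop]
  have htake : raw.toList.take (pvL raw) = raw.toList.takeWhile PySem.Chars.isspace := by
    have hpre := List.takeWhile_prefix (l := raw.toList) (p := PySem.Chars.isspace)
    exact (List.prefix_iff_eq_take.mp hpre).symm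
  have hdall : (raw.toList.drop (pvL raw)).all PySem.Chars.isspace = false := by
    rcases h : (raw.toList.drop (pvL raw)).all PySem.Chars.isspace with _ | _
    · rfl
    · exfalso
      have hwhole : raw.toList.all PySem.Chars.isspace = true := by
        rw [← List.take_append_drop (pvL raw) raw.toList, List.all_append, h, htake]
        simp only [Bool.and_true, List.all_eq_true]
        intro x hx
        exact List.mem_takeWhile_imp hx
      simp [hwhole] at hall
  rw [pvT, hsplit, List.takeWhile_append, if_neg (by simpa using pv_not_all_len _ hdall)]

lemma pv_main (raw : String) (start : Int) :
    trim_with_span_py raw start = trim_with_span_py_alt raw start := by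
  have hlenraw : PySem.Str.len raw = (raw.toList.length : Int) := rfl
  have hL_le : pvL raw ≤ raw.toList.length := (List.takeWhile_prefix _).length_le
  have hA_left : pvLeftLoop raw 0 (raw.toList.length : Int) = (pvL raw : Int) := by
    have h := pvLeftLoop_eq raw raw.toList.length 0 (by omega) (by omega)
    simpa [pvL] using h
  have hA_right : pvRightLoop raw ((pvL raw : Nat) : Int) (raw.toList.length : Int)
      = (pvL raw : Int) + (pvRlen raw : Int) := by
    have h := pvRightLoop_eq raw (pvL raw) (raw.toList.length - pvL raw) raw.toList.length
      (by omega) hL_le (le_refl _)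
    rw [List.take_of_length_le (by rw [List.length_drop])] at h
    exact h
  have hscan := pvScan_eq raw.toList 0 (none, none)
  simp only [zero_add, Option.none_or] at hscan
  simp only [trim_with_span_py, trim_with_span_py_alt, hlenraw]
  rw [hA_left, hA_right, hscan]
  by_cases hall : raw.toList.all PySem.Chars.isspace = true
  · -- all-whitespace (or empty): A trims to the empty slice at the right end
    rw [if_pos hall]
    have hLlen : pvL raw = raw.toList.length := by
      rw [pvL, List.takeWhile_eq_self_iff.mpr (fun x hx => (List.all_eq_true.mp hall) x hx)]
    have hR0 : pvRlen raw = 0 := by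
      rw [pvRlen, hLlen, List.drop_length]
      simp
    have hslice : PySem.Str.slice raw (some ((pvL raw : Nat) : Int))
        (some ((pvL raw : Int) + (pvRlen raw : Int))) = "" := by
      rw [← String.toList_inj, PySem.Str.toList_slice]
      simp only [PySem.Chars.slice_eq_listSlice]
      rw [show (pvL raw : Int) + (pvRlen raw : Int) = ((pvL raw + pvRlen raw : Nat) : Int) by push_cast; ring,
        PySem.List.slice_natCast]
      simp [hR0, hLlen]
    rw [hslice]
    simp only [hLlen, hR0]
    norm_num
  · -- some non-whitespace char: B's scan finds exactly A's bounds
    rw [if_neg hall]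
    have hall' : raw.toList.all PySem.Chars.isspace = false := by
      simpa using hall
    have hT := pvT_eq raw hall'
    have hT_le : pvT raw ≤ raw.toList.length - pvL raw := by
      rw [hT]
      have := (List.takeWhile_prefix (p := PySem.Chars.isspace)
        (l := (raw.toList.drop (pvL raw)).reverse)).length_le
      simpa using this
    have hRlen : pvRlen raw = raw.toList.length - pvL raw - pvT raw := by
      rw [pvRlen, hT]
      have hsum : ((raw.toList.drop (pvL raw)).reverse.takeWhile PySem.Chars.isspace).length
          + ((raw.toList.drop (pvL raw)).reverse.dropWhile PySem.Chars.isspace).length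
          = raw.toList.length - pvL raw := by
        rw [← List.length_append, List.takeWhile_append_dropWhile]
        simp
      omega
    have hpvT : ((raw.toList.reverse.takeWhile PySem.Chars.isspace).length : Int) = (pvT raw : Int) := by
      rw [pvT]
    have hpvL : ((raw.toList.takeWhile PySem.Chars.isspace).length : Int) = (pvL raw : Int) := by
      rw [pvL]
    dsimp only
    simp only [Option.getD_some, hpvT, hpvL]
    have hidx : (raw.toList.length : Int) - 1 - (pvT raw : Int) + 1
        = (pvL raw : Int) + (pvRlen raw : Int) := by omega
    have h3 : start + ((raw.toList.length : Int) - 1 - (pvT raw : Int)) + 1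
        = start + ((pvL raw : Int) + (pvRlen raw : Int)) := by omega
    rw [hidx, h3]

-- ===== VERDICT (by name: the statement is the Claim_ definition above) =====
theorem trim_with_span_py_spec : Claim_equal_trim_with_span_py := by
  intro raw start _
  exact pv_main raw start
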